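-- pv_equiv track=rewrite | github.com/kouseven7/backtest-project | dssms_task_2_1_integration_manager.py | _extract_import_statements
-- ===== SOURCE A (Python) =====
-- from typing import Dict, List, Optional, Tuple, Any, Union
--
-- def _extract_import_statements(content: str) -> List[str]:
--     """import文の抽出"""
--     import_lines = []
--     lines = content.split('\n')
--
--     for i, line in enumerate(lines):
--         stripped = line.strip()
--         if stripped.startswith('import ') or stripped.startswith('from '):
--             # try-except内のimportも検出
--             if 'try:' in lines[max(0, i-5):i]:
--                 import_lines.append(f"conditional_import: {stripped}")
--             else:
--                 import_lines.append(stripped)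
--
--     return import_lines
-- ===== SOURCE B (Python) =====
-- def _extract_import_statements(content: str):
--     """import文の抽出 — single pass keeping a 'lines since last try:' countdown
--     instead of re-scanning a 5-line window for every import line."""
--     import_lines = []
--     countdown = 0
--     for line in content.split('\n'):
--         stripped = line.strip()
--         if stripped.startswith('import ') or stripped.startswith('from '):
--             if countdown > 0:
--                 import_lines.append(f"conditional_import: {stripped}")
--             else:
--                 import_lines.append(stripped)
--         countdown = 5 if line == 'try:' else (countdown - 1 if countdown > 0 else 0)
--     return import_lines
-- ===== Notes on version B (the rewrite author's own statement) =====
-- stated objective: alternative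
-- what changed: Replaces A's per-import-line membership scan of the sliced 5-line window lines[max(0,i-5):i] by a single pass that carries a countdown state (reset to 5 on a raw 'try:' line, decremented otherwise), so no slicing or window re-scan happens at all.
import Mathlib
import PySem

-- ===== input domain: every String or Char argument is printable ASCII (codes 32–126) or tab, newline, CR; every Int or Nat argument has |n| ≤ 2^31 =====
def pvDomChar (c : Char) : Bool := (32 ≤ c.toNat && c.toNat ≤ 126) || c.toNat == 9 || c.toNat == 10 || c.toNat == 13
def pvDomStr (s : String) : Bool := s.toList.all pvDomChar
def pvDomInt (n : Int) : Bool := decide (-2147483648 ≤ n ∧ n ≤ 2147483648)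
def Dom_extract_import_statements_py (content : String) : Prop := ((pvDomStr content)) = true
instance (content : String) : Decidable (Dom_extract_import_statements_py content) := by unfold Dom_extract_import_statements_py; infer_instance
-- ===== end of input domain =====

-- B replaces A's per-import-line rescan of the previous 5-line window by a single-pass
-- countdown ('lines since the last raw `try:` line'); same output, alternative decomposition.


-- ===== PORT A =====
-- loop body of A's `for i, line in enumerate(lines)` (named so the proofs can refer to it)
def pvBodyA (lines : List String) (import_lines : List String) (p : Int × String) : List String :=
  let i := p.1
  let line := p.2
  let stripped := PySem.Str.strip line
  if PySem.Str.startswith stripped "import " || PySem.Str.startswith stripped "from " then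
    -- `'try:' in lines[max(0, i-5):i]`
    if "try:" ∈ PySem.List.slice lines (some (max 0 (i - 5))) (some i) then
      import_lines ++ ["conditional_import: " ++ stripped]
    else
      import_lines ++ [stripped]
  else import_lines

def extract_import_statements_py (content : String) : List String :=
  let lines := (PySem.Str.split? content "\n").getD []
  (PySem.List.enumerate lines 0).foldl (pvBodyA lines) []

-- ===== PORT B =====
-- `countdown = 5 if line == 'try:' else (countdown - 1 if countdown > 0 else 0)`
def pvStep (c : Nat) (line : String) : Nat :=
  if line = "try:" then 5 else if c > 0 then c - 1 else 0

-- loop body of B: state = (import_lines, countdown)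
def pvBodyB (st : List String × Nat) (line : String) : List String × Nat :=
  let stripped := PySem.Str.strip line
  let out :=
    if PySem.Str.startswith stripped "import " || PySem.Str.startswith stripped "from " then
      if st.2 > 0 then st.1 ++ ["conditional_import: " ++ stripped]
      else st.1 ++ [stripped]
    else st.1
  (out, pvStep st.2 line)

def extract_import_statements_py_alt (content : String) : List String :=
  (((PySem.Str.split? content "\n").getD []).foldl pvBodyB ([], 0)).1

-- ===== PRECONDITION & SPEC =====
def Spec_extract_import_statements_py (content : String) (out : List String) : Prop := out = extract_import_statements_py_alt content
instance (content : String) (out : List String) : Decidable (Spec_extract_import_statements_py content out) := by unfold Spec_extract_import_statements_py; infer_instance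

-- ===== CLAIM (what is proved, stated in full; the proofs are below) =====
def Claim_equal_extract_import_statements_py : Prop := ∀ (content : String), Dom_extract_import_statements_py content → Spec_extract_import_statements_py content (extract_import_statements_py content)

-- ===== LEMMAS AND PROOFS =====

-- the countdown after processing q (B's `countdown` state)
def pvCnt (q : List String) : Nat := q.foldl pvStep 0

lemma pvStep_le (c : Nat) (l : String) (h : c ≤ 5) : pvStep c l ≤ 5 := by
  unfold pvStep; split_ifs <;> omega

lemma pvCnt_aux_le (q : List String) : ∀ c, c ≤ 5 → q.foldl pvStep c ≤ 5 := by
  induction q with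
  | nil => intro c h; simpa using h
  | cons l q ih => intro c h; simpa [List.foldl] using ih _ (pvStep_le c l h)

lemma pvCnt_le (q : List String) : pvCnt q ≤ 5 := pvCnt_aux_le q 0 (by omega)

-- characterisation: countdown ≥ k  ↔  a raw "try:" line occurs among the last (6-k) lines of q
lemma pvCnt_iff (q : List String) : ∀ k : Nat, 1 ≤ k →
    (k ≤ pvCnt q ↔ "try:" ∈ q.drop (q.length - (6 - k))) := by
  induction q using List.reverseRecOn with
  | nil => intro k hk; simp [pvCnt]; omega
  | append_singleton q l ih =>
    intro k hk
    have hcnt : pvCnt (q ++ [l]) = pvStep (pvCnt q) l := by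
      simp [pvCnt, List.foldl_append]
    by_cases hl : l = "try:"
    · subst hl
      rw [hcnt]
      simp only [pvStep, if_pos]
      by_cases hk5 : k ≤ 5
      · have hd : (q ++ ["try:"]).length - (6 - k) ≤ q.length := by
          simp; omega
        constructor
        · intro _
          have : (q ++ ["try:"]).drop ((q ++ ["try:"]).length - (6 - k)) =
              q.drop ((q ++ ["try:"]).length - (6 - k)) ++ ["try:"] :=
            List.drop_append_of_le_length hd
          rw [this]; simp
        · intro _; exact hk5
      · have : (q ++ ["try:"]).length - (6 - k) = (q ++ ["try:"]).length := by
          simp; omega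
        rw [this, List.drop_length]
        simp; omega
    · rw [hcnt]
      have hstep : pvStep (pvCnt q) l = pvCnt q - 1 := by
        unfold pvStep; rw [if_neg hl]; split_ifs <;> omega
      rw [hstep]
      have hihk := ih (k + 1) (by omega)
      have hle := pvCnt_le q
      by_cases hk5 : k ≤ 5
      · have harith : (q ++ [l]).length - (6 - k) = q.length - (6 - (k + 1)) := by
          simp; omega
        have hd : q.length - (6 - (k + 1)) ≤ q.length := by omega
        rw [harith, List.drop_append_of_le_length hd]
        constructor
        · intro h
          have : k + 1 ≤ pvCnt q := by omega
          have := hihk.mp this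
          exact List.mem_append_left _ this
        · intro h
          rcases List.mem_append.mp h with h | h
          · have := hihk.mpr h; omega
          · simp at h; exact absurd h.symm hl
      · have : (q ++ [l]).length - (6 - k) = (q ++ [l]).length := by
          simp; omega
        rw [this, List.drop_length]
        simp; omega
    
-- A's window for the line at index q.length of q ++ rest is the last 5 lines of q
lemma pvSlice_window (q : List String) (rest : List String) :
    PySem.List.slice (q ++ rest) (some (max 0 ((q.length : Int) - 5))) (some (q.length : Int)) =
      q.drop (q.length - 5) := by
  have hmax : max 0 ((q.length : Int) - 5) = ((q.length - 5 : Nat) : Int) := by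
    rw [Int.max_def]; split_ifs <;> omega
  rw [hmax, PySem.List.slice_natCast]
  have hd : q.length - 5 ≤ q.length := by omega
  rw [List.drop_append_of_le_length hd]
  have hlen : (q.drop (q.length - 5)).length = q.length - (q.length - 5) := by
    simp
  rw [List.take_append_of_le_length (by omega), List.take_of_length_le (by omega)]

-- one loop step of A (at index q.length) equals one loop step of B when the state matches
lemma pvBody_agree (q rest acc : List String) (l : String) :
    pvBodyA (q ++ l :: rest) acc ((q.length : Int), l) = (pvBodyB (acc, pvCnt q) l).1 := by
  have hiff : ("try:" ∈ q.drop (q.length - 5)) ↔ 0 < pvCnt q := by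
    have := (pvCnt_iff q 1 (by omega)).symm
    simpa using this
  by_cases hc : 0 < pvCnt q
  · have hm : "try:" ∈ q.drop (q.length - 5) := hiff.mpr hc
    simp [pvBodyA, pvBodyB, pvSlice_window q (l :: rest), hm, hc]
  · have hm : "try:" ∉ q.drop (q.length - 5) := fun h => hc (hiff.mp h)
    simp [pvBodyA, pvBodyB, pvSlice_window q (l :: rest), hm, hc]

-- main loop invariant: A's fold over the remaining enumerated lines equals B's fold,
-- with B's countdown equal to pvCnt of the processed prefix q
lemma pvLoop (rest : List String) : ∀ (q acc : List String),
    (PySem.List.enumerate rest (q.length : Int)).foldl (pvBodyA (q ++ rest)) acc =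
      (rest.foldl pvBodyB (acc, pvCnt q)).1 := by
  induction rest with
  | nil => intro q acc; simp [PySem.List.enumerate]
  | cons l rest ih =>
    intro q acc
    rw [PySem.List.enumerate_cons, List.foldl_cons, List.foldl_cons]
    have hb := pvBody_agree q rest acc l
    rw [hb]
    have hcast : (q.length : Int) + 1 = (((q ++ [l]).length : Nat) : Int) := by
      simp
    have hassoc : q ++ l :: rest = (q ++ [l]) ++ rest := by simp
    have hcnt : (pvBodyB (acc, pvCnt q) l).2 = pvCnt (q ++ [l]) := by
      simp [pvBodyB, pvCnt, List.foldl_append]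
    calc (PySem.List.enumerate rest ((q.length : Int) + 1)).foldl
          (pvBodyA (q ++ l :: rest)) (pvBodyB (acc, pvCnt q) l).1
        = (PySem.List.enumerate rest (((q ++ [l]).length : Nat) : Int)).foldl
          (pvBodyA ((q ++ [l]) ++ rest)) (pvBodyB (acc, pvCnt q) l).1 := by
          rw [hcast, hassoc]
      _ = (rest.foldl pvBodyB ((pvBodyB (acc, pvCnt q) l).1, pvCnt (q ++ [l]))).1 :=
          ih (q ++ [l]) (pvBodyB (acc, pvCnt q) l).1
      _ = (rest.foldl pvBodyB (pvBodyB (acc, pvCnt q) l)).1 := by rw [← hcnt]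
          

-- ===== VERDICT (by name: the statement is the Claim_ definition above) =====
theorem extract_import_statements_py_spec : Claim_equal_extract_import_statements_py := by
  intro content _
  unfold Spec_extract_import_statements_py extract_import_statements_py extract_import_statements_py_alt
  have := pvLoop ((PySem.Str.split? content "\n").getD []) [] []
  simpa [pvCnt] using this
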